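-- pv_equiv track=rewrite | github.com/RADobson/doppeldown | ml/src/realtime_scorer.py | _consecutive_digits
-- ===== SOURCE A (Python) =====
-- def _consecutive_digits(s: str) -> int:
--     """Count maximum consecutive digits."""
--     max_digits = current_digits = 0
--     for c in s:
--         if c.isdigit():
--             current_digits += 1
--             max_digits = max(max_digits, current_digits)
--         else:
--             current_digits = 0
--     return max_digits
-- ===== SOURCE B (Python) =====
-- def _consecutive_digits(s: str) -> int:
--     """Count maximum consecutive digits (run-scan: jump over each maximal digit run)."""
--     best = 0
--     i = 0
--     n = len(s)
--     while i < n: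
--         if s[i].isdigit():
--             j = i + 1
--             while j < n and s[j].isdigit():
--                 j += 1
--             best = max(best, j - i)
--             i = j
--         else:
--             i += 1
--     return best
-- ===== Notes on version B (the rewrite author's own statement) =====
-- stated objective: alternative
-- what changed: Replaced the per-character running-counter-with-max fold by a two-level run scan that locates each maximal digit run, takes its length in one inner scan, and keeps the best length.
import Mathlib
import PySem

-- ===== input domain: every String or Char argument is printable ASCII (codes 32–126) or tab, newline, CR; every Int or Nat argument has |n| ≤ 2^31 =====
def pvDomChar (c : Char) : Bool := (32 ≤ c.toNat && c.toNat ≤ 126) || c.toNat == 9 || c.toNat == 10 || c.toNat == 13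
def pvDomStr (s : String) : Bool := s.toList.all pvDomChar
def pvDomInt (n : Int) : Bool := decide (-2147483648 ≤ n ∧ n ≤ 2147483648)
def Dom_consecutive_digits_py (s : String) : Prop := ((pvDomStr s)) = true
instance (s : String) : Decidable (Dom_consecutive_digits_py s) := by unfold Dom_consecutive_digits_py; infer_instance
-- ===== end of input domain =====

-- B replaces A's per-character running-counter fold by a two-level run scan
-- (find each maximal digit run, measure it in one inner scan, keep the best); alternative decomposition, same cost.


-- ===== PORT A =====
-- for c in s: if c.isdigit(): current += 1; max = max(max, current) else: current = 0
def consecutive_digits_py (s : String) : Int :=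
  (s.toList.foldl
    (fun (st : Int × Int) c =>
      if PySem.Chars.isdigit c then (max st.1 (st.2 + 1), st.2 + 1) else (st.1, 0))
    (0, 0)).1

-- ===== PORT B =====
-- run scan: at a digit, measure the whole maximal digit run, keep the best, continue after it
def consecutive_digits_py_altGo : List Char → Int
  | [] => 0
  | c :: t =>
    if PySem.Chars.isdigit c then
      max (1 + ((t.takeWhile PySem.Chars.isdigit).length : Int))
        (consecutive_digits_py_altGo (t.dropWhile PySem.Chars.isdigit))
    else consecutive_digits_py_altGo t
termination_by l => l.length
decreasing_by
  · simpa using Nat.lt_succ_of_le (List.length_dropWhile_le _ _)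
  · simp

def consecutive_digits_py_alt (s : String) : Int :=
  consecutive_digits_py_altGo s.toList

-- ===== PRECONDITION & SPEC =====
def Spec_consecutive_digits_py (s : String) (out : Int) : Prop := out = consecutive_digits_py_alt s
instance (s : String) (out : Int) : Decidable (Spec_consecutive_digits_py s out) := by unfold Spec_consecutive_digits_py; infer_instance

-- ===== CLAIM (what is proved, stated in full; the proofs are below) =====
def Claim_equal_consecutive_digits_py : Prop := ∀ (s : String), Dom_consecutive_digits_py s → Spec_consecutive_digits_py s (consecutive_digits_py s)

-- ===== LEMMAS AND PROOFS =====

-- A's fold, with the already-recorded maximum stripped off: the best run still ahead, seeded with cur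
def pvAux (cur : Int) : List Char → Int
  | [] => 0
  | c :: t => if PySem.Chars.isdigit c then max (cur + 1) (pvAux (cur + 1) t) else pvAux 0 t

lemma foldA_eq (l : List Char) : ∀ m cur : Int, 0 ≤ m →
    (l.foldl
      (fun (st : Int × Int) c =>
        if PySem.Chars.isdigit c then (max st.1 (st.2 + 1), st.2 + 1) else (st.1, 0))
      (m, cur)).1 = max m (pvAux cur l) := by
  induction l with
  | nil => intro m cur hm; simp [pvAux]; omega
  | cons c t ih =>
    intro m cur hm
    by_cases hc : PySem.Chars.isdigit c = true
    · simp only [List.foldl_cons, hc, if_true, pvAux]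
      rw [ih _ _ (le_trans hm (le_max_left _ _)), max_assoc]
    · simp only [List.foldl_cons, hc, if_false, pvAux, Bool.false_eq_true]
      exact ih _ _ hm

lemma pvAux_spec_aux : ∀ (n : Nat) (l : List Char), l.length ≤ n → ∀ cur : Int,
    pvAux cur l =
      (match l with
        | [] => consecutive_digits_py_altGo l
        | c :: t =>
          if PySem.Chars.isdigit c then
            max (cur + 1 + ((t.takeWhile PySem.Chars.isdigit).length : Int))
              (consecutive_digits_py_altGo (t.dropWhile PySem.Chars.isdigit))
          else consecutive_digits_py_altGo l) := by
  intro n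
  induction n with
  | zero =>
    intro l hl cur
    match l with
    | [] => simp [pvAux, consecutive_digits_py_altGo]
  | succ n ihn =>
    intro l hl cur
    have ih : ∀ (t : List Char), t.length ≤ n → ∀ cur : Int,
        pvAux cur t =
          (match t with
            | [] => consecutive_digits_py_altGo t
            | c :: t' =>
              if PySem.Chars.isdigit c then
                max (cur + 1 + ((t'.takeWhile PySem.Chars.isdigit).length : Int))
                  (consecutive_digits_py_altGo (t'.dropWhile PySem.Chars.isdigit))
              else consecutive_digits_py_altGo t) := ihn
    match l with
    | [] => simp [pvAux, consecutive_digits_py_altGo]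
    | c :: t =>
      by_cases hc : PySem.Chars.isdigit c = true
      · simp only [hc, if_true]
        rw [show pvAux cur (c :: t) = max (cur + 1) (pvAux (cur + 1) t) from by
          simp [pvAux, hc]]
        rw [ih t (by simpa using Nat.lt_succ_iff.mp (Nat.lt_of_lt_of_le (by simp) hl)) (cur + 1)]
        match t with
        | [] => simp
        | d :: t' =>
          by_cases hd : PySem.Chars.isdigit d = true
          · simp only [hd, if_true, List.takeWhile_cons, List.dropWhile_cons]
            rw [← max_assoc]
            have hlen : (0:Int) ≤ ((t'.takeWhile PySem.Chars.isdigit).length : Int) :=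
              Int.natCast_nonneg _
            have hmx : max (cur + 1) (cur + 1 + 1 + ((t'.takeWhile PySem.Chars.isdigit).length : Int))
                = cur + 1 + 1 + ((t'.takeWhile PySem.Chars.isdigit).length : Int) :=
              max_eq_right (by omega)
            rw [hmx]
            congr 1
            simp only [List.length_cons]
            push_cast; ring
          · simp [hd]
      · rw [show pvAux cur (c :: t) = pvAux 0 t from by simp [pvAux, hc]]
        simp only [hc, Bool.false_eq_true, if_false]
        rw [ih t (by simpa using Nat.lt_succ_iff.mp (Nat.lt_of_lt_of_le (by simp) hl)) 0]
        rw [show consecutive_digits_py_altGo (c :: t) = consecutive_digits_py_altGo t from by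
          simp [consecutive_digits_py_altGo, hc]]
        match t with
        | [] => rfl
        | d :: t' =>
          by_cases hd : PySem.Chars.isdigit d = true
          · simp only [hd, if_true]
            rw [show consecutive_digits_py_altGo (d :: t') =
                max (1 + ((t'.takeWhile PySem.Chars.isdigit).length : Int))
                  (consecutive_digits_py_altGo (t'.dropWhile PySem.Chars.isdigit)) from by
              simp [consecutive_digits_py_altGo, hd]]
            push_cast; ring_nf
          · simp [hd]

lemma pvAux_zero (l : List Char) : pvAux 0 l = consecutive_digits_py_altGo l := by
  rw [pvAux_spec_aux l.length l le_rfl 0]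
  match l with
  | [] => rfl
  | c :: t =>
    by_cases hc : PySem.Chars.isdigit c = true
    · simp only [hc, if_true]
      rw [show consecutive_digits_py_altGo (c :: t) =
          max (1 + ((t.takeWhile PySem.Chars.isdigit).length : Int))
            (consecutive_digits_py_altGo (t.dropWhile PySem.Chars.isdigit)) from by
        simp [consecutive_digits_py_altGo, hc]]
      push_cast; ring_nf
    · simp [hc]

lemma altGo_nonneg_aux : ∀ (n : Nat) (l : List Char), l.length ≤ n → 0 ≤ consecutive_digits_py_altGo l := by
  intro n
  induction n with
  | zero =>
    intro l hl
    match l with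
    | [] => simp [consecutive_digits_py_altGo]
  | succ n ih =>
    intro l hl
    match l with
    | [] => simp [consecutive_digits_py_altGo]
    | c :: t =>
      by_cases hc : PySem.Chars.isdigit c = true
      · rw [show consecutive_digits_py_altGo (c :: t) =
            max (1 + ((t.takeWhile PySem.Chars.isdigit).length : Int))
              (consecutive_digits_py_altGo (t.dropWhile PySem.Chars.isdigit)) from by
          simp [consecutive_digits_py_altGo, hc]]
        have := Int.natCast_nonneg (t.takeWhile PySem.Chars.isdigit).length
        omega
      · rw [show consecutive_digits_py_altGo (c :: t) = consecutive_digits_py_altGo t from by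
          simp [consecutive_digits_py_altGo, hc]]
        exact ih t (by simpa using Nat.lt_succ_iff.mp (Nat.lt_of_lt_of_le (by simp) hl))

lemma altGo_nonneg (l : List Char) : 0 ≤ consecutive_digits_py_altGo l :=
  altGo_nonneg_aux l.length l le_rfl

-- ===== VERDICT (by name: the statement is the Claim_ definition above) =====
theorem consecutive_digits_py_spec : Claim_equal_consecutive_digits_py := by
  intro s _
  unfold Spec_consecutive_digits_py consecutive_digits_py consecutive_digits_py_alt
  rw [foldA_eq _ 0 0 le_rfl, pvAux_zero]
  exact max_eq_right (altGo_nonneg _)
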